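-- pv_equiv track=rewrite | github.com/onlymee/aoc2020 | day11/day11-2.py | iterate2
-- ===== SOURCE A (Python) =====
-- def iterate2(mp):
--     adj=[]
--     newMp=[]
--     occ=0
--     chg=0
--     for i,row in enumerate(mp):
--         newRow=""
--         for j,seat in enumerate(row):
--           if seat=='.':
--               newRow+=seat
--               continue
--           newSeat=seat
--           cnt=scan(mp,i,j)
--           if cnt==0: newSeat='#'
--           if cnt>=5: newSeat='L'
--           if newSeat!=seat: chg+=1
--           if newSeat=='#': occ+=1
--           newRow+=newSeat
--         newMp.append(newRow)
--     return (occ,chg,newMp)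
--
-- def onMap(r,c,h,w):
--     return (r>=0 and c>=0 and r<h and c<w)
--
-- def scan(mp,r,c):
--     seats=""
--     h=len(mp)
--     w=len(mp[0])
--     vec=[(-1,0),(0,-1),(1,0),(0,1),(-1,-1),(-1,1),(1,-1),(1,1)]
--     pos=[(r,c) for i in range(8)]
--     while len(vec)>0:
--         newPos=[]
--         newVec=[]
--         for i in range(len(vec)):
--             (dr,dc)=vec[i]
--             (pr,pc)=pos[i]
--             pr+=dr
--             pc+=dc
--             if onMap(pr,pc,h,w):
--                 if mp[pr][pc] in "#L":
--                     seats+=mp[pr][pc]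
--                 else:
--                     newPos.append((pr,pc))
--                     newVec.append((dr,dc))
--         vec=newVec
--         pos=newPos
--     return seats.count('#')
-- ===== SOURCE B (Python) =====
-- def iterate2(mp):
--     occ = 0
--     chg = 0
--     newMp = []
--     for i, row in enumerate(mp):
--         o, g, newRow = _row_stats(mp, i, row)
--         occ += o
--         chg += g
--         newMp.append(newRow)
--     return (occ, chg, newMp)
--
--
-- def _row_stats(mp, i, row):
--     o = 0
--     g = 0
--     out = []
--     for j, seat in enumerate(row):
--         if seat == '.':
--             out.append(seat)
--         else:
--             cnt = _visible(mp, i, j)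
--             new = '#' if cnt == 0 else ('L' if cnt >= 5 else seat)
--             if new != seat:
--                 g += 1
--             if new == '#':
--                 o += 1
--             out.append(new)
--     return o, g, "".join(out)
--
--
-- def _visible(mp, r, c):
--     h = len(mp)
--     w = len(mp[0])
--     cnt = 0
--     for dr, dc in ((-1, 0), (0, -1), (1, 0), (0, 1), (-1, -1), (-1, 1), (1, -1), (1, 1)):
--         pr, pc = r + dr, c + dc
--         while 0 <= pr < h and 0 <= pc < w:
--             ch = mp[pr][pc]
--             if ch == '#':
--                 cnt += 1
--                 break
--             if ch == 'L':
--                 break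
--             pr += dr
--             pc += dc
--     return cnt
-- ===== Notes on version B (the rewrite author's own statement) =====
-- stated objective: simpler
-- what changed: scan's while-loop over parallel active-ray lists (vec/pos rebuilt each round, seats string accumulated then counted) is replaced by eight independent per-direction walks that each step outward until leaving the map or hitting a seat, summing direct hits of '#'; the per-cell thresholds and accounting are factored into a per-row helper.
-- outside the precondition, e.g. on iterate2(['..', '.']): A returns (0, 0, ['..', '.']), B returns (0, 0, ['..', '.'])
import Mathlib
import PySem

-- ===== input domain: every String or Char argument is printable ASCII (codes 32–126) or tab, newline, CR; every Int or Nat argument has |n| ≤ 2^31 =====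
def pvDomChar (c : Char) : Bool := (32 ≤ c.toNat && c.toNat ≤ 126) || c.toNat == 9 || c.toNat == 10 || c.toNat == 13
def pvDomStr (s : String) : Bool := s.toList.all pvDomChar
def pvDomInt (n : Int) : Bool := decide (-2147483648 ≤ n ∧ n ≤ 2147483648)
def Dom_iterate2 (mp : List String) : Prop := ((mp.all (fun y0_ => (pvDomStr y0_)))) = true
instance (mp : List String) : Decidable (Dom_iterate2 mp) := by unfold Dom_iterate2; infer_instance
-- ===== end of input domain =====

-- B replaces A's parallel active-ray lists by eight independent outward walks (one per
-- direction), keeping the same cell loop and thresholds: simpler, same exact result.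


-- ===== PORT A =====

-- onMap(r,c,h,w)
def pvOnMap (r c h w : Int) : Bool :=
  decide (r ≥ 0) && decide (c ≥ 0) && decide (r < h) && decide (c < w)

-- mp[r][c], made total (used by both ports; under Pre_ it is only ever evaluated in range)
def pvCell (mp : List String) (r c : Int) : Char :=
  PySem.List.pyGetD (PySem.List.pyGetD mp r "").toList c ' '

-- one pass of A's `for i in range(len(vec))`: returns (seats added, newVec, newPos)
def scanRoundA (mp : List String) (h w : Int) :
    List (Int × Int) → List (Int × Int) → List Char × List (Int × Int) × List (Int × Int)
  | [], _ => ([], [], [])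
  | _ :: _, [] => ([], [], [])   -- unreachable: vec and pos always have equal length
  | (dr, dc) :: vs, (pr, pc) :: ps =>
      let pr' := pr + dr
      let pc' := pc + dc
      let rest := scanRoundA mp h w vs ps
      if pvOnMap pr' pc' h w then
        let ch := pvCell mp pr' pc'
        -- mp[pr][pc] in "#L" (a single char is in "#L" iff it is '#' or 'L')
        if ch = '#' ∨ ch = 'L' then (ch :: rest.1, rest.2.1, rest.2.2)
        else (rest.1, (dr, dc) :: rest.2.1, (pr', pc') :: rest.2.2)
      else (rest.1, rest.2.1, rest.2.2)

-- A's `while len(vec)>0` loop; fuel only makes it total: every surviving ray moves one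
-- step per round, so all rays have left the h×w box after at most h+w rounds
def scanLoopA (mp : List String) (h w : Int) :
    Nat → List (Int × Int) → List (Int × Int) → List Char
  | 0, _, _ => []
  | fuel + 1, vec, pos =>
      if 0 < vec.length then
        let r := scanRoundA mp h w vec pos
        r.1 ++ scanLoopA mp h w fuel r.2.1 r.2.2
      else []

-- scan(mp, r, c)
def scanA (mp : List String) (r c : Int) : Int :=
  let h : Int := mp.length
  let w : Int := PySem.Str.len (PySem.List.pyGetD mp 0 "")
  let vec : List (Int × Int) := [(-1,0),(0,-1),(1,0),(0,1),(-1,-1),(-1,1),(1,-1),(1,1)]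
  let pos : List (Int × Int) := List.replicate 8 (r, c)   -- [(r,c) for i in range(8)]
  -- seats.count('#'); seats holds single chars, so str.count = char count
  ((scanLoopA mp h w ((h + w).toNat + 1) vec pos).count '#' : Int)

def iterate2 (mp : List String) : Int × Int × List String :=
  (PySem.List.enumerate mp 0).foldl
    (fun (acc : Int × Int × List String) (iRow : Int × String) =>
      let rowRes := (PySem.List.enumerate iRow.2.toList 0).foldl
        (fun (racc : Int × Int × List Char) (jSeat : Int × Char) =>
          if jSeat.2 = '.' then (racc.1, racc.2.1, racc.2.2 ++ [jSeat.2])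
          else
            let cnt := scanA mp iRow.1 jSeat.1
            let newSeat := jSeat.2
            let newSeat := if cnt = 0 then '#' else newSeat
            let newSeat := if cnt ≥ 5 then 'L' else newSeat
            let chg := if newSeat ≠ jSeat.2 then racc.2.1 + 1 else racc.2.1
            let occ := if newSeat = '#' then racc.1 + 1 else racc.1
            (occ, chg, racc.2.2 ++ [newSeat]))
        (acc.1, acc.2.1, [])
      (rowRes.1, rowRes.2.1, acc.2.2 ++ [String.ofList rowRes.2.2]))
    (0, 0, [])

-- ===== PORT B =====

-- B's per-direction while loop: walk outward from (pr,pc); 1 if the first seat seen is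
-- '#', else 0.  Fuel only makes the while loop total (same bound as in scanA).
def walkB (mp : List String) (h w dr dc : Int) : Nat → Int → Int → Int
  | 0, _, _ => 0
  | fuel + 1, pr, pc =>
      if decide (0 ≤ pr ∧ pr < h ∧ 0 ≤ pc ∧ pc < w) then
        let ch := pvCell mp pr pc
        if ch = '#' then 1
        else if ch = 'L' then 0
        else walkB mp h w dr dc fuel (pr + dr) (pc + dc)
      else 0

-- _visible(mp, r, c): sum of the eight independent walks
def visibleB (mp : List String) (r c : Int) : Int :=
  let h : Int := mp.length
  let w : Int := PySem.Str.len (PySem.List.pyGetD mp 0 "")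
  [((-1:Int),(0:Int)),(0,-1),(1,0),(0,1),(-1,-1),(-1,1),(1,-1),(1,1)].foldl
    (fun cnt d => cnt + walkB mp h w d.1 d.2 ((h + w).toNat + 1) (r + d.1) (c + d.2)) 0

-- _row_stats(mp, i, row)
def rowStatsB (mp : List String) (i : Int) (row : String) : Int × Int × String :=
  let res := (PySem.List.enumerate row.toList 0).foldl
    (fun (acc : Int × Int × List Char) (js : Int × Char) =>
      if js.2 = '.' then (acc.1, acc.2.1, acc.2.2 ++ [js.2])
      else
        let cnt := visibleB mp i js.1
        let new := if cnt = 0 then '#' else if cnt ≥ 5 then 'L' else js.2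
        (if new = '#' then acc.1 + 1 else acc.1,
         if new ≠ js.2 then acc.2.1 + 1 else acc.2.1,
         acc.2.2 ++ [new]))
    (0, 0, [])
  (res.1, res.2.1, String.ofList res.2.2)

def iterate2_alt (mp : List String) : Int × Int × List String :=
  (PySem.List.enumerate mp 0).foldl
    (fun (acc : Int × Int × List String) (ir : Int × String) =>
      let s := rowStatsB mp ir.1 ir.2
      (acc.1 + s.1, acc.2.1 + s.2.1, acc.2.2 ++ [s.2.2]))
    (0, 0, [])

-- ===== PRECONDITION & SPEC =====
-- Pre_ excludes maps with a row shorter than the first row: there A's scan can raise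
-- IndexError (mp[pr][pc] with pc < len(mp[0]) but pc ≥ len(mp[pr])); such maps on which
-- A happens to return (no seat's ray reaches a missing cell) are excluded with them.
def Pre_iterate2 (mp : List String) : Prop :=
  ∀ s ∈ mp, PySem.Str.len (PySem.List.pyGetD mp 0 "") ≤ PySem.Str.len s
instance (mp : List String) : Decidable (Pre_iterate2 mp) := by
  unfold Pre_iterate2; infer_instance

def pvWitness_iterate2 : List String := ["L.", "##"]

def Spec_iterate2 (mp : List String) (out : Int × Int × List String) : Prop := out = iterate2_alt mp
instance (mp : List String) (out : Int × Int × List String) : Decidable (Spec_iterate2 mp out) := by unfold Spec_iterate2; infer_instance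

-- ===== CLAIM (what is proved, stated in full; the proofs are below) =====
def Claim_equal_iterate2 : Prop := ∀ (mp : List String), Dom_iterate2 mp → Pre_iterate2 mp → Spec_iterate2 mp (iterate2 mp)

-- ===== LEMMAS AND PROOFS =====

theorem pvOnMap_eq (r c h w : Int) :
    pvOnMap r c h w = decide (0 ≤ r ∧ r < h ∧ 0 ≤ c ∧ c < w) := by
  rw [Bool.eq_iff_iff]
  simp [pvOnMap]
  omega

-- sum of B-walks over the zipped ray list: a ray (d, p) about to be stepped by A's round
-- corresponds to a B-walk that is about to inspect p + d
def sumW (mp : List String) (h w : Int) (f : Nat) (rays : List ((Int × Int) × (Int × Int))) : Int :=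
  (rays.map (fun r => walkB mp h w r.1.1 r.1.2 f (r.2.1 + r.1.1) (r.2.2 + r.1.2))).sum

theorem sumW_zero (mp : List String) (h w : Int) (rays : List ((Int × Int) × (Int × Int))) :
    sumW mp h w 0 rays = 0 := by
  induction rays with
  | nil => rfl
  | cons a t ih => simp only [sumW, walkB, List.map_cons, List.sum_cons] at ih ⊢; omega

-- one round of A's parallel loop accounts for one step of every B-walk
theorem round_step (mp : List String) (h w : Int) (f : Nat) :
    ∀ (vec pos : List (Int × Int)),
      sumW mp h w (f + 1) (vec.zip pos) =
        (((scanRoundA mp h w vec pos).1.count '#' : Int))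
          + sumW mp h w f ((scanRoundA mp h w vec pos).2.1.zip (scanRoundA mp h w vec pos).2.2) := by
  intro vec
  induction vec with
  | nil => intro pos; simp [scanRoundA, sumW]
  | cons v vs ih =>
    intro pos
    cases pos with
    | nil =>
      obtain ⟨dr, dc⟩ := v
      simp [scanRoundA, sumW]
    | cons p ps =>
      obtain ⟨dr, dc⟩ := v
      obtain ⟨pr, pc⟩ := p
      have hih := ih ps
      simp only [List.zip_cons_cons, scanRoundA, sumW, List.map_cons, List.sum_cons]
      simp only [sumW] at hih
      rw [walkB, pvOnMap_eq]
      by_cases hb : (0 ≤ pr + dr ∧ pr + dr < h ∧ 0 ≤ pc + dc ∧ pc + dc < w)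
      · by_cases h1 : pvCell mp (pr + dr) (pc + dc) = '#'
        · simp [hb, h1, hih]
          omega
        · by_cases h2 : pvCell mp (pr + dr) (pc + dc) = 'L'
          · simp [hb, h2, hih]
          · simp [hb, h1, h2, hih]
            omega
      · simp [hb, hih]

-- A's whole while loop counts exactly the sum of B's walks
theorem loop_eq_sumW (mp : List String) (h w : Int) :
    ∀ (f : Nat) (vec pos : List (Int × Int)),
      ((scanLoopA mp h w f vec pos).count '#' : Int) = sumW mp h w f (vec.zip pos) := by
  intro f
  induction f with
  | zero => intro vec pos; simp [scanLoopA, sumW_zero]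
  | succ f ih =>
    intro vec pos
    cases vec with
    | nil => simp [scanLoopA, sumW]
    | cons v vs =>
      simp only [scanLoopA, List.length_cons, Nat.zero_lt_succ, if_pos]
      rw [round_step mp h w f (v :: vs) pos]
      simp [List.count_append, ih]

theorem scan_eq (mp : List String) (r c : Int) : scanA mp r c = visibleB mp r c := by
  simp only [scanA, visibleB]
  rw [loop_eq_sumW]
  simp only [sumW, List.replicate, List.zip_cons_cons, List.zip_nil_right,
    List.map_cons, List.map_nil, List.sum_cons, List.sum_nil,
    List.foldl_cons, List.foldl_nil]
  omega

-- the per-seat bodies of the two inner loops agree once scanA is replaced by visibleB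
theorem inner_body_eq (mp : List String) (i : Int) (racc : Int × Int × List Char) (js : Int × Char) :
    (if js.2 = '.' then (racc.1, racc.2.1, racc.2.2 ++ [js.2])
     else
       let cnt := scanA mp i js.1
       let newSeat := js.2
       let newSeat := if cnt = 0 then '#' else newSeat
       let newSeat := if cnt ≥ 5 then 'L' else newSeat
       let chg := if newSeat ≠ js.2 then racc.2.1 + 1 else racc.2.1
       let occ := if newSeat = '#' then racc.1 + 1 else racc.1
       (occ, chg, racc.2.2 ++ [newSeat]))
    = (if js.2 = '.' then (racc.1, racc.2.1, racc.2.2 ++ [js.2])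
       else
         let cnt := visibleB mp i js.1
         let new := if cnt = 0 then '#' else if cnt ≥ 5 then 'L' else js.2
         (if new = '#' then racc.1 + 1 else racc.1,
          if new ≠ js.2 then racc.2.1 + 1 else racc.2.1,
          racc.2.2 ++ [new])) := by
  by_cases hdot : js.2 = '.'
  · simp [hdot]
  · simp only [if_neg hdot, scan_eq]
    by_cases h0 : visibleB mp i js.1 = 0
    · simp [h0, show ¬ (5:Int) ≤ 0 by omega]
    · by_cases h5 : visibleB mp i js.1 ≥ 5
      · simp [h0, h5]
      · simp [h0, h5]

-- the inner loop's (occ, chg) accumulator shifts additively and its row output is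
-- independent of the start value, for any step function that is itself additive
theorem foldl_shift (g : (Int × Int × List Char) → (Int × Char) → (Int × Int × List Char))
    (hg : ∀ (a b : Int) (out : List Char) (x : Int × Char),
      g (a, b, out) x = (a + (g (0, 0, []) x).1, b + (g (0, 0, []) x).2.1,
                         out ++ (g (0, 0, []) x).2.2)) :
    ∀ (l : List (Int × Char)) (a b : Int) (out : List Char),
      l.foldl g (a, b, out)
        = (a + (l.foldl g (0, 0, [])).1, b + (l.foldl g (0, 0, [])).2.1,
           out ++ (l.foldl g (0, 0, [])).2.2) := by
  intro l
  induction l with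
  | nil => intro a b out; simp
  | cons x t ih =>
    intro a b out
    rcases hgx : g (0, 0, []) x with ⟨d1, d2, o⟩
    simp only [List.foldl_cons, hg a b out x, hgx]
    rw [ih, ih d1 d2 o]
    simp [add_assoc]

theorem iterate2_eq (mp : List String) : iterate2 mp = iterate2_alt mp := by
  simp only [iterate2, iterate2_alt]
  congr 1
  funext acc ir
  simp only [rowStatsB]
  have hcongr :
      (PySem.List.enumerate ir.2.toList 0).foldl
        (fun (racc : Int × Int × List Char) (jSeat : Int × Char) =>
          if jSeat.2 = '.' then (racc.1, racc.2.1, racc.2.2 ++ [jSeat.2])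
          else
            let cnt := scanA mp ir.1 jSeat.1
            let newSeat := jSeat.2
            let newSeat := if cnt = 0 then '#' else newSeat
            let newSeat := if cnt ≥ 5 then 'L' else newSeat
            let chg := if newSeat ≠ jSeat.2 then racc.2.1 + 1 else racc.2.1
            let occ := if newSeat = '#' then racc.1 + 1 else racc.1
            (occ, chg, racc.2.2 ++ [newSeat])) (acc.1, acc.2.1, []) =
      (PySem.List.enumerate ir.2.toList 0).foldl
        (fun (acc : Int × Int × List Char) (js : Int × Char) =>
          if js.2 = '.' then (acc.1, acc.2.1, acc.2.2 ++ [js.2])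
          else
            let cnt := visibleB mp ir.1 js.1
            let new := if cnt = 0 then '#' else if cnt ≥ 5 then 'L' else js.2
            (if new = '#' then acc.1 + 1 else acc.1,
             if new ≠ js.2 then acc.2.1 + 1 else acc.2.1,
             acc.2.2 ++ [new])) (acc.1, acc.2.1, []) := by
    congr 1
    funext racc js
    exact inner_body_eq mp ir.1 racc js
  rw [hcongr]
  rw [foldl_shift _ ?hg (PySem.List.enumerate ir.2.toList 0) acc.1 acc.2.1 []]
  case hg =>
    intro a b out x
    by_cases hdot : x.2 = '.'
    · simp [hdot]
    · simp only [if_neg hdot]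
      split_ifs <;> simp
  simp

-- ===== VERDICT (by name: the statement is the Claim_ definition above) =====
theorem iterate2_spec : Claim_equal_iterate2 := by
  intro mp _ _
  unfold Spec_iterate2
  exact iterate2_eq mp
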